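-- pv_equiv track=rewrite | github.com/wyk18703232953/myResearch | codeComplex/data/filteredData/python/cubic/python_cubic_0124.py | solve_one_case
-- ===== SOURCE A (Python) =====
-- def solve_one_case(s: str, t: str) -> str:
--     N = len(t)
--     for i in range(1, N + 1):
--         # dp[l][j]: using first l chars of s, having matched t1[0:j],
--         #           how many chars of t2 have been matched (or -1 if impossible)
--         dp = [[0] + [-1] * i for _ in range(len(s) + 1)]
--         for l, c in enumerate(s):
--             for j in range(i + 1):
--                 dp[l + 1][j] = dp[l][j]
--                 # use c for t2 (suffix)
--                 if dp[l][j] != -1: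
--                     if i + dp[l][j] < N and t[i + dp[l][j]] == c:
--                         dp[l + 1][j] = dp[l][j] + 1
--                 # use c for t1 (prefix)
--                 if j != 0 and c == t[j - 1]:
--                     if dp[l][j - 1] > dp[l + 1][j]:
--                         dp[l + 1][j] = dp[l][j - 1]
--         if dp[-1][i] == N - i:
--             return "YES"
--     return "NO"
-- ===== SOURCE B (Python) =====
-- def solve_one_case(s: str, t: str) -> str:
--     N = len(t)
--     L = len(s)
--     for i in range(1, N + 1):
--         memo = {}
--         def g(l, j):
--             key = (l, j)
--             if key in memo:
--                 return memo[key]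
--             if l == 0:
--                 r = 0 if j == 0 else -1
--             else:
--                 c = s[l - 1]
--                 a = g(l - 1, j)
--                 r = a + 1 if (a != -1 and i + a < N and t[i + a] == c) else a
--                 if j != 0 and c == t[j - 1]:
--                     b = g(l - 1, j - 1)
--                     if b > r:
--                         r = b
--             memo[key] = r
--             return r
--         if g(L, i) == N - i:
--             return "YES"
--     return "NO"
-- ===== Notes on version B (the rewrite author's own statement) =====
-- stated objective: alternative
-- what changed: For each split point i, A fills a bottom-up (len(s)+1)x(i+1) DP table; B replaces the table with a top-down dict-memoized recursion g(l, j) = max suffix characters matched using the first l chars of s with j prefix chars matched, evaluating only reachable states.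
import Mathlib
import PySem

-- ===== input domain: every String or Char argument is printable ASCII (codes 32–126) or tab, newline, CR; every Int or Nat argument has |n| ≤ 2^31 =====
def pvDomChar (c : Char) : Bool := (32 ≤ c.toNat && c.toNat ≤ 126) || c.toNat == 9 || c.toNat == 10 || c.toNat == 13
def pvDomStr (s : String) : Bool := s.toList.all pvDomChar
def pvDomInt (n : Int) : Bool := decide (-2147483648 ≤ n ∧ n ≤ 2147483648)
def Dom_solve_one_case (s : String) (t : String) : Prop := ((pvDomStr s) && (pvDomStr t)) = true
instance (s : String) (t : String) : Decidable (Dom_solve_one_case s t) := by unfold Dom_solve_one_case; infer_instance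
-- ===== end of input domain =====

-- B replaces A's per-split bottom-up 2D table with a top-down memoized recursion g(l,j);
-- objective: alternative decomposition (same asymptotic cost, no speed claim).

-- ===== PORT A =====
-- A fills dp row by row; each new row is computed from the previous row only
-- (dp[l+1][j] reads dp[l][j] and dp[l][j-1]), so the table is ported as a fold over s
-- producing successive rows. List indexing uses getD (-1): every Python access is in range.
def pvA_nextRow (t : List Char) (N i : Nat) (prev : List Int) (c : Char) : List Int :=
  (List.range (i + 1)).map fun j =>
    let a := prev.getD j (-1)
    -- use c for t2 (suffix)
    let r := if a ≠ -1 ∧ (i : Int) + a < (N : Int) ∧ PySem.List.pyGet? t ((i : Int) + a) = some c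
             then a + 1 else a
    -- use c for t1 (prefix)
    if j ≠ 0 ∧ PySem.List.pyGet? t ((j : Int) - 1) = some c ∧ prev.getD (j - 1) (-1) > r
    then prev.getD (j - 1) (-1) else r

def pvA_check (sl t : List Char) (N i : Nat) : Bool :=
  (sl.foldl (pvA_nextRow t N i) ((0 : Int) :: List.replicate i (-1))).getD i (-1)
    == (N : Int) - (i : Int)

def pvA_loop (sl t : List Char) (N : Nat) : List Nat → String
  | [] => "NO"
  | i :: rest => if pvA_check sl t N i then "YES" else pvA_loop sl t N rest

def solve_one_case (s : String) (t : String) : String :=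
  pvA_loop s.toList t.toList t.toList.length ((List.range t.toList.length).map (· + 1))

-- ===== PORT B =====
-- top-down recursion g(l, j) (the Python memo cache is an operational optimisation;
-- the recursion itself is ported structurally)
def pvB_g (sl t : List Char) (N i : Nat) : Nat → Nat → Int
  | 0, j => if j = 0 then 0 else -1
  | l + 1, j =>
    let c := sl.getD l 'a'
    let a := pvB_g sl t N i l j
    let r := if a ≠ -1 ∧ (i : Int) + a < (N : Int) ∧ PySem.List.pyGet? t ((i : Int) + a) = some c
             then a + 1 else a
    if j ≠ 0 ∧ PySem.List.pyGet? t ((j : Int) - 1) = some c then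
      let b := pvB_g sl t N i l (j - 1)
      if b > r then b else r
    else r

def pvB_loop (sl t : List Char) (N : Nat) : List Nat → String
  | [] => "NO"
  | i :: rest =>
    if pvB_g sl t N i sl.length i == (N : Int) - (i : Int) then "YES"
    else pvB_loop sl t N rest

def solve_one_case_alt (s : String) (t : String) : String :=
  pvB_loop s.toList t.toList t.toList.length ((List.range t.toList.length).map (· + 1))

-- ===== PRECONDITION & SPEC =====
def Spec_solve_one_case (s : String) (t : String) (out : String) : Prop := out = solve_one_case_alt s t
instance (s : String) (t : String) (out : String) : Decidable (Spec_solve_one_case s t out) := by unfold Spec_solve_one_case; infer_instance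

-- ===== CLAIM (what is proved, stated in full; the proofs are below) =====
def Claim_equal_solve_one_case : Prop := ∀ (s : String) (t : String), Dom_solve_one_case s t → Spec_solve_one_case s t (solve_one_case s t)

-- ===== LEMMAS AND PROOFS =====

-- g only looks at the first l characters of sl
theorem pvB_g_prefix (xs ys t : List Char) (N i : Nat) :
    ∀ l j, l ≤ xs.length → pvB_g (xs ++ ys) t N i l j = pvB_g xs t N i l j := by
  intro l
  induction l with
  | zero => intro j _; rfl
  | succ l ih =>
    intro j hl
    have hlt : l < xs.length := by omega
    simp only [pvB_g, ih _ (by omega), List.getD_append _ _ _ _ hlt]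

-- the row after folding the first l characters agrees with g(l, ·) on indices ≤ i
theorem pvA_row_eq_g (t : List Char) (N i : Nat) :
    ∀ (xs : List Char) (j : Nat), j ≤ i →
      (xs.foldl (pvA_nextRow t N i) ((0 : Int) :: List.replicate i (-1))).getD j (-1)
        = pvB_g xs t N i xs.length j := by
  intro xs
  induction xs using List.reverseRecOn with
  | nil =>
    intro j _
    rw [List.foldl_nil]
    cases j with
    | zero => simp [pvB_g]
    | succ j => simp [pvB_g, List.getD]
  | append_singleton ys x ih =>
    intro j hj
    rw [List.foldl_append]
    have hlen : (ys ++ [x]).length = ys.length + 1 := by simp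
    rw [hlen]
    have hget : (ys ++ [x]).getD ys.length 'a' = x := by
      simp
    have hrec : ∀ j', pvB_g (ys ++ [x]) t N i ys.length j' = pvB_g ys t N i ys.length j' :=
      fun j' => pvB_g_prefix ys [x] t N i ys.length j' (le_refl _)
    simp only [pvB_g, hget, hrec]
    -- evaluate getD on the mapped range
    have hmap : ∀ (f : Nat → Int), (((List.range (i + 1)).map f).getD j (-1)) = f j := by
      intro f
      rw [List.getD_eq_getElem?_getD]
      simp [Nat.lt_succ_of_le hj]
    rw [List.foldl_cons, List.foldl_nil]
    simp only [pvA_nextRow, hmap, ih j hj, ih (j - 1) (by omega)]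
    by_cases hc : j ≠ 0 ∧ PySem.List.pyGet? t ((j : Int) - 1) = some x
    · rcases hc with ⟨h1, h2⟩
      by_cases hb : pvB_g ys t N i ys.length (j - 1) >
          (if pvB_g ys t N i ys.length j ≠ -1 ∧ (i : Int) + pvB_g ys t N i ys.length j < (N : Int) ∧
              PySem.List.pyGet? t ((i : Int) + pvB_g ys t N i ys.length j) = some x
           then pvB_g ys t N i ys.length j + 1 else pvB_g ys t N i ys.length j)
      · simp [h1, h2, hb]
      · simp [h1, h2, hb]
    · rw [not_and_or] at hc
      rcases hc with hc | hc
      · simp at hc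
        simp [hc]
      · by_cases h1 : j = 0
        · simp [h1]
        · simp [h1, hc]

theorem pvA_check_eq (sl t : List Char) (N i : Nat) :
    pvA_check sl t N i = (pvB_g sl t N i sl.length i == (N : Int) - (i : Int)) := by
  unfold pvA_check
  rw [pvA_row_eq_g t N i sl i (le_refl i)]

theorem pv_loop_eq (sl t : List Char) (N : Nat) :
    ∀ L : List Nat, pvA_loop sl t N L = pvB_loop sl t N L := by
  intro L
  induction L with
  | nil => rfl
  | cons i rest ih =>
    simp only [pvA_loop, pvB_loop, pvA_check_eq, ih]

-- ===== VERDICT (by name: the statement is the Claim_ definition above) =====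
theorem solve_one_case_spec : Claim_equal_solve_one_case := by
  intro s t _
  unfold Spec_solve_one_case solve_one_case solve_one_case_alt
  exact pv_loop_eq _ _ _ _
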